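-- pv_equiv track=rewrite | github.com/Bobmarlinjr/adventofcode | Day 8/Day8.py | check_for_antinodes
-- ===== SOURCE A (Python) =====
-- def compute_combinations(l):
--     combos = []
--     if len(l) < 2:
--         raise Exception("too few values to get combos!")
--     if len(l) == 2:
--         return [[l[0], l[1]]]
--     for x in l[1:]:
--         combos.extend([[l[0], x]])
--     combos.extend(compute_combinations(l[1:]))
--     return(combos)
--
-- def check_edges(node_map, node):
--     if node[1] in range(len(node_map)) and node[0] in range(len(node_map[0])):
--         return True
--     return False
--
-- def check_for_antinodes(node_map, nodes):
--     found_antinodes = []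
--     for node_type, coords in nodes.items():
--         for coord_combo in compute_combinations(coords):
--             delta_x = coord_combo[0][0] - coord_combo[1][0]
--             delta_y = coord_combo[0][1] - coord_combo[1][1]
--             antinode1 = (coord_combo[0][0] + delta_x, coord_combo[0][1] + delta_y)
--             antinode2 = (coord_combo[1][0] - delta_x, coord_combo[1][1] - delta_y)
--             if antinode1 not in found_antinodes and check_edges(node_map, antinode1):
--                 found_antinodes.append(antinode1)
--             if antinode2 not in found_antinodes and check_edges(node_map, antinode2):
--                 found_antinodes.append(antinode2)
--     return found_antinodes
-- ===== SOURCE B (Python) =====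
-- def check_for_antinodes(node_map, nodes):
--     rows = len(node_map)
--     cols = len(node_map[0]) if node_map else 0
--     found_antinodes = []
--     seen = set()
--     for coords in nodes.values():
--         n = len(coords)
--         for i in range(n):
--             x1, y1 = coords[i]
--             for j in range(i + 1, n):
--                 x2, y2 = coords[j]
--                 dx = x1 - x2
--                 dy = y1 - y2
--                 for cand in ((x1 + dx, y1 + dy), (x2 - dx, y2 - dy)):
--                     if cand not in seen and 0 <= cand[1] < rows and 0 <= cand[0] < cols:
--                         seen.add(cand)
--                         found_antinodes.append(cand)
--     return found_antinodes
-- ===== Notes on version B (the rewrite author's own statement) =====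
-- stated objective: alternative
-- what changed: B replaces A's recursive pair generator with nested i<j index loops and replaces A's linear 'not in found_antinodes' list scan with a hash-set of already-found antinodes kept alongside the ordered result list.
import Mathlib
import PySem

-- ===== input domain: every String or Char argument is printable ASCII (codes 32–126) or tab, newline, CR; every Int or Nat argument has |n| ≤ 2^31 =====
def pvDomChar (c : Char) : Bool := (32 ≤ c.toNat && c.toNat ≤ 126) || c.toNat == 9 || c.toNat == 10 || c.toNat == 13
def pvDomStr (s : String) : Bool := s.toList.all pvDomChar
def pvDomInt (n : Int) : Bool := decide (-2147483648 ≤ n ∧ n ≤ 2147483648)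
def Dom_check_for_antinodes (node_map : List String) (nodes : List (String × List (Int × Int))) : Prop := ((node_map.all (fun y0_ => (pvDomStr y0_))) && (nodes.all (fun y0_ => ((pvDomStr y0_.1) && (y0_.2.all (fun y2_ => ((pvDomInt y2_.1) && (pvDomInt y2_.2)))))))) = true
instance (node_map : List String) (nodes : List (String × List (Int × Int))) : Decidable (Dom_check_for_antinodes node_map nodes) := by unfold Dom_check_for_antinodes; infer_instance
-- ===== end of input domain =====

-- B replaces A's recursive pair generator by nested index loops and the list-membership
-- test by a hash-set alongside the ordered result list (objective: alternative).

-- ===== PORT A =====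
-- Python raises "too few values to get combos!" on lists of length < 2; those inputs are
-- excluded by Pre_check_for_antinodes, the first two branches only make the port total.
def compute_combinations : List (Int × Int) → List ((Int × Int) × (Int × Int))
  | [] => []
  | [_] => []
  | [a, b] => [(a, b)]
  | a :: rest => rest.map (fun x => (a, x)) ++ compute_combinations rest

def check_edges (node_map : List String) (node : Int × Int) : Bool :=
  (decide (0 ≤ node.2 ∧ node.2 < (node_map.length : Int))) &&
  (match node_map with
   | [] => false
   | row0 :: _ => decide (0 ≤ node.1 ∧ node.1 < PySem.Str.len row0))

-- `nodes.items()`: the Python function receives a dict, i.e. the association list with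
-- duplicate keys collapsed (last value, first position) = PySem.Dict.ofList nodes.
def check_for_antinodes (node_map : List String) (nodes : List (String × List (Int × Int))) : List (Int × Int) :=
  ((PySem.Dict.ofList nodes).items).foldl (fun found_antinodes tc =>
    (compute_combinations tc.2).foldl (fun found_antinodes cc =>
      let delta_x := cc.1.1 - cc.2.1
      let delta_y := cc.1.2 - cc.2.2
      let antinode1 := (cc.1.1 + delta_x, cc.1.2 + delta_y)
      let antinode2 := (cc.2.1 - delta_x, cc.2.2 - delta_y)
      let found1 := if antinode1 ∉ found_antinodes ∧ check_edges node_map antinode1 = true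
        then found_antinodes ++ [antinode1] else found_antinodes
      if antinode2 ∉ found1 ∧ check_edges node_map antinode2 = true
        then found1 ++ [antinode2] else found1) found_antinodes) []

-- ===== PORT B =====
def check_for_antinodes_alt (node_map : List String) (nodes : List (String × List (Int × Int))) : List (Int × Int) :=
  let rows : Int := node_map.length
  let cols : Int := match node_map with | [] => 0 | row0 :: _ => PySem.Str.len row0
  (((PySem.Dict.ofList nodes).values).foldl (fun st coords =>
    let n : Int := coords.length
    (PySem.List.pyRange 0 n 1).foldl (fun st i =>
      let p1 := PySem.List.pyGetD coords i (0, 0)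
      (PySem.List.pyRange (i + 1) n 1).foldl (fun st j =>
        let p2 := PySem.List.pyGetD coords j (0, 0)
        let dx := p1.1 - p2.1
        let dy := p1.2 - p2.2
        [(p1.1 + dx, p1.2 + dy), (p2.1 - dx, p2.2 - dy)].foldl (fun st cand =>
          if PySem.Set.contains st.2 cand = false ∧ 0 ≤ cand.2 ∧ cand.2 < rows ∧ 0 ≤ cand.1 ∧ cand.1 < cols
          then (st.1 ++ [cand], PySem.Set.add st.2 cand) else st) st) st) st)
    (([], PySem.Set.empty) : List (Int × Int) × PySem.Set (Int × Int))).1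

-- ===== PRECONDITION & SPEC =====
-- Pre_ excludes exactly the inputs on which Python A raises
-- Exception("too few values to get combos!"): a dict value with fewer than 2 coordinates.
def Pre_check_for_antinodes (node_map : List String) (nodes : List (String × List (Int × Int))) : Prop :=
  ∀ p ∈ (PySem.Dict.ofList nodes).items, 2 ≤ p.2.length
instance (node_map : List String) (nodes : List (String × List (Int × Int))) : Decidable (Pre_check_for_antinodes node_map nodes) := by unfold Pre_check_for_antinodes; infer_instance

def pvWitness_check_for_antinodes : List String × (List (String × List (Int × Int))) :=
  (["..", ".."], [("a", [(0, 0), (1, 1)])])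

def Spec_check_for_antinodes (node_map : List String) (nodes : List (String × List (Int × Int))) (out : List (Int × Int)) : Prop := out = check_for_antinodes_alt node_map nodes
instance (node_map : List String) (nodes : List (String × List (Int × Int))) (out : List (Int × Int)) : Decidable (Spec_check_for_antinodes node_map nodes out) := by unfold Spec_check_for_antinodes; infer_instance

-- ===== CLAIM (what is proved, stated in full; the proofs are below) =====
def Claim_equal_check_for_antinodes : Prop := ∀ (node_map : List String) (nodes : List (String × List (Int × Int))), Dom_check_for_antinodes node_map nodes → Pre_check_for_antinodes node_map nodes → Spec_check_for_antinodes node_map nodes (check_for_antinodes node_map nodes)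

-- ===== LEMMAS AND PROOFS =====
-- helpers (proof side)
def pvCols (node_map : List String) : Int :=
  match node_map with | [] => 0 | row0 :: _ => PySem.Str.len row0

def candA (nm : List String) (found : List (Int × Int)) (cand : Int × Int) : List (Int × Int) :=
  if cand ∉ found ∧ check_edges nm cand = true then found ++ [cand] else found

def pairA (nm : List String) (found : List (Int × Int)) (cc : (Int × Int) × (Int × Int)) : List (Int × Int) :=
  candA nm (candA nm found (cc.1.1 + (cc.1.1 - cc.2.1), cc.1.2 + (cc.1.2 - cc.2.2)))
    (cc.2.1 - (cc.1.1 - cc.2.1), cc.2.2 - (cc.1.2 - cc.2.2))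

def candB (rows cols : Int) (st : List (Int × Int) × PySem.Set (Int × Int)) (cand : Int × Int) :
    List (Int × Int) × PySem.Set (Int × Int) :=
  if PySem.Set.contains st.2 cand = false ∧ 0 ≤ cand.2 ∧ cand.2 < rows ∧ 0 ≤ cand.1 ∧ cand.1 < cols
  then (st.1 ++ [cand], PySem.Set.add st.2 cand) else st

def pairB (rows cols : Int) (st : List (Int × Int) × PySem.Set (Int × Int))
    (p : (Int × Int) × (Int × Int)) : List (Int × Int) × PySem.Set (Int × Int) :=
  [(p.1.1 + (p.1.1 - p.2.1), p.1.2 + (p.1.2 - p.2.2)),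
   (p.2.1 - (p.1.1 - p.2.1), p.2.2 - (p.1.2 - p.2.2))].foldl (candB rows cols) st

theorem portA_eq (nm : List String) (nodes : List (String × List (Int × Int))) :
    check_for_antinodes nm nodes
    = ((PySem.Dict.ofList nodes).items).foldl (fun found tc =>
        (compute_combinations tc.2).foldl (pairA nm) found) [] := rfl

theorem portB_eq (nm : List String) (nodes : List (String × List (Int × Int))) :
    check_for_antinodes_alt nm nodes
    = (((PySem.Dict.ofList nodes).values).foldl (fun st coords =>
        (PySem.List.pyRange 0 (coords.length : Int) 1).foldl (fun st i =>
          (PySem.List.pyRange (i + 1) (coords.length : Int) 1).foldl (fun st j =>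
            pairB (nm.length : Int) (pvCols nm) st
              (PySem.List.pyGetD coords i (0, 0), PySem.List.pyGetD coords j (0, 0))) st) st)
        (([], PySem.Set.empty) : List (Int × Int) × PySem.Set (Int × Int))).1 := rfl

theorem cc_cons (a : Int × Int) (rest : List (Int × Int)) :
    compute_combinations (a :: rest) = rest.map (fun x => (a, x)) ++ compute_combinations rest := by
  match rest with
  | [] => rfl
  | [b] => rfl
  | b :: c :: t => rfl

theorem pv_pairs_nat {σ : Type} (f : σ → ((Int × Int) × (Int × Int)) → σ) :
    ∀ (coords : List (Int × Int)) (st : σ),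
    (List.range coords.length).foldl (fun st k =>
      ((coords.drop (k + 1)).map (fun p2 => (coords.getD k (0, 0), p2))).foldl f st) st
    = (compute_combinations coords).foldl f st := by
  intro coords
  induction coords with
  | nil => intro st; rfl
  | cons a rest ih =>
    intro st
    rw [cc_cons, List.foldl_append, List.length_cons, List.range_succ_eq_map,
        List.foldl_cons, List.foldl_map]
    have hbody : (fun (st : σ) (k : Nat) =>
        (((a :: rest).drop (k.succ + 1)).map (fun p2 => ((a :: rest).getD k.succ (0, 0), p2))).foldl f st)
        = (fun (st : σ) (k : Nat) =>
        ((rest.drop (k + 1)).map (fun p2 => (rest.getD k (0, 0), p2))).foldl f st) := by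
      funext st k
      simp [List.getD]
    rw [hbody, ih]
    simp [List.getD]

theorem pv_idx_pairs {σ : Type} (f : σ → ((Int × Int) × (Int × Int)) → σ)
    (coords : List (Int × Int)) (st : σ) :
    (PySem.List.pyRange 0 (coords.length : Int) 1).foldl (fun st i =>
      (PySem.List.pyRange (i + 1) (coords.length : Int) 1).foldl (fun st j =>
        f st (PySem.List.pyGetD coords i (0, 0), PySem.List.pyGetD coords j (0, 0))) st) st
    = (compute_combinations coords).foldl f st := by
  have hinner : (PySem.List.pyRange 0 (coords.length : Int) 1).foldl (fun st i =>
      (PySem.List.pyRange (i + 1) (coords.length : Int) 1).foldl (fun st j =>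
        f st (PySem.List.pyGetD coords i (0, 0), PySem.List.pyGetD coords j (0, 0))) st) st
      = (PySem.List.pyRange 0 (coords.length : Int) 1).foldl (fun st i =>
        ((coords.drop (i + 1).toNat).map (fun p2 => (PySem.List.pyGetD coords i (0, 0), p2))).foldl f st) st := by
    refine PySem.List.foldl_congr_mem _ _ _ _ ?_
    intro st i hi
    have h0 : 0 ≤ i + 1 := by
      have := (PySem.List.mem_pyRange_one.mp hi).1; omega
    rw [PySem.List.foldl_pyRange_pyGetD'
      (f := fun st p2 => f st (PySem.List.pyGetD coords i (0, 0), p2)) (ha := h0), List.foldl_map]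
  rw [hinner, PySem.List.pyRange_zero_natCast, List.foldl_map]
  have hcast : (fun (st : σ) (k : Nat) =>
      ((coords.drop (((k : Int)) + 1).toNat).map
        (fun p2 => (PySem.List.pyGetD coords ((k : Nat) : Int) (0, 0), p2))).foldl f st)
      = (fun (st : σ) (k : Nat) =>
      ((coords.drop (k + 1)).map (fun p2 => (coords.getD k (0, 0), p2))).foldl f st) := by
    funext st k
    have h1 : (((k : Nat) : Int) + 1).toNat = k + 1 := by omega
    rw [h1, PySem.List.pyGetD_natCast]
  rw [hcast]
  exact pv_pairs_nat f coords st

theorem ce_iff (nm : List String) (cand : Int × Int) :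
    check_edges nm cand = true ↔
    (0 ≤ cand.2 ∧ cand.2 < (nm.length : Int) ∧ 0 ≤ cand.1 ∧ cand.1 < pvCols nm) := by
  cases nm with
  | nil => simp [check_edges, pvCols]
  | cons r t => simp [check_edges, pvCols]; tauto

theorem candB_diag (nm : List String) (found : List (Int × Int)) (cand : Int × Int) :
    candB (nm.length : Int) (pvCols nm) (found, found) cand
    = (candA nm found cand, candA nm found cand) := by
  unfold candB candA
  by_cases h : cand ∉ found ∧ check_edges nm cand = true
  · rw [if_pos h, if_pos]
    · simp [PySem.Set.add_of_not_mem h.1]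
    · refine ⟨?_, (ce_iff nm cand).mp h.2⟩
      simp at *
      exact h.1
  · rw [if_neg h, if_neg]
    intro hb
    apply h
    constructor
    · have := hb.1
      simp at this ⊢
      intro hm
      exact absurd ((PySem.Set.contains_iff _ _).mpr hm) (by simp [this])
    · exact (ce_iff nm cand).mpr hb.2

theorem pairB_diag (nm : List String) (found : List (Int × Int)) (p : (Int × Int) × (Int × Int)) :
    pairB (nm.length : Int) (pvCols nm) (found, found) p
    = (pairA nm found p, pairA nm found p) := by
  unfold pairB pairA
  rw [List.foldl_cons, candB_diag, List.foldl_cons, candB_diag, List.foldl_nil]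

theorem fold_diag (nm : List String) (pairs : List ((Int × Int) × (Int × Int))) :
    ∀ found : List (Int × Int),
    pairs.foldl (pairB (nm.length : Int) (pvCols nm)) (found, found)
    = (pairs.foldl (pairA nm) found, pairs.foldl (pairA nm) found) := by
  induction pairs with
  | nil => intro found; rfl
  | cons p t ih =>
    intro found
    rw [List.foldl_cons, List.foldl_cons, pairB_diag, ih]

theorem items_diag (nm : List String) (l : List (String × List (Int × Int))) :
    ∀ found : List (Int × Int),
    l.foldl (fun st tc => (compute_combinations tc.2).foldl (pairB (nm.length : Int) (pvCols nm)) st) (found, found)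
    = (l.foldl (fun fd tc => (compute_combinations tc.2).foldl (pairA nm) fd) found,
       l.foldl (fun fd tc => (compute_combinations tc.2).foldl (pairA nm) fd) found) := by
  induction l with
  | nil => intro found; rfl
  | cons tc t ih =>
    intro found
    rw [List.foldl_cons, List.foldl_cons, fold_diag, ih]

theorem main_eq (nm : List String) (nodes : List (String × List (Int × Int))) :
    check_for_antinodes nm nodes = check_for_antinodes_alt nm nodes := by
  rw [portA_eq, portB_eq]
  have hv : (PySem.Dict.ofList nodes).values
      = ((PySem.Dict.ofList nodes).items).map (fun tc => tc.2) := rfl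
  rw [hv, List.foldl_map]
  have hbody : (fun (st : List (Int × Int) × PySem.Set (Int × Int)) (tc : String × List (Int × Int)) =>
      (PySem.List.pyRange 0 (tc.2.length : Int) 1).foldl (fun st i =>
        (PySem.List.pyRange (i + 1) (tc.2.length : Int) 1).foldl (fun st j =>
          pairB (nm.length : Int) (pvCols nm) st
            (PySem.List.pyGetD tc.2 i (0, 0), PySem.List.pyGetD tc.2 j (0, 0))) st) st)
      = (fun st tc => (compute_combinations tc.2).foldl (pairB (nm.length : Int) (pvCols nm)) st) := by
    funext st tc
    exact pv_idx_pairs (pairB (nm.length : Int) (pvCols nm)) tc.2 st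
  rw [hbody]
  have hempty : (([], PySem.Set.empty) : List (Int × Int) × PySem.Set (Int × Int))
      = (([], []) : List (Int × Int) × PySem.Set (Int × Int)) := rfl
  rw [hempty, items_diag]

-- ===== VERDICT (by name: the statement is the Claim_ definition above) =====
theorem check_for_antinodes_spec : Claim_equal_check_for_antinodes := by
  intro node_map nodes _ _
  unfold Spec_check_for_antinodes
  exact main_eq node_map nodes
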